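-- pv_equiv track=rewrite | github.com/collective/collective.plonefinder | collective/plonefinder/browser/finder.py | getPathClass
-- ===== SOURCE A (Python) =====
-- def getPathClass(browsedpath, currentpath):
--     """
--     if currentpath == browsedpath return ' currentitem'
--     if currentpath is parent of browsedpath return ' currentnode'
--     else return ''
--     """
--
--     if currentpath == browsedpath:
--         return ' currentitem'
--     else:
--         browsedpathList = browsedpath.split('/')
--         currentpathList = currentpath.split('/')
--         if len(browsedpathList) > len(currentpathList):
--             isCurrentNode = True
--             for index, id in enumerate(currentpathList):
--                 if id != browsedpathList[index]:
--                     isCurrentNode = False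
--                     break
--             if isCurrentNode:
--                 return ' currentnode'
--     return ''
-- ===== SOURCE B (Python) =====
-- def getPathClass(browsedpath, currentpath):
--     """
--     if currentpath == browsedpath return ' currentitem'
--     if currentpath is parent of browsedpath return ' currentnode'
--     else return ''
--     """
--     if currentpath == browsedpath:
--         return ' currentitem'
--     if browsedpath.startswith(currentpath + '/'):
--         return ' currentnode'
--     return ''
-- ===== Notes on version B (the rewrite author's own statement) =====
-- stated objective: idiomatic
-- what changed: Replaces splitting both paths into '/'-separated lists and an element-wise enumerate loop by a single startswith(currentpath + '/') test on the raw strings.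
import Mathlib
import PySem

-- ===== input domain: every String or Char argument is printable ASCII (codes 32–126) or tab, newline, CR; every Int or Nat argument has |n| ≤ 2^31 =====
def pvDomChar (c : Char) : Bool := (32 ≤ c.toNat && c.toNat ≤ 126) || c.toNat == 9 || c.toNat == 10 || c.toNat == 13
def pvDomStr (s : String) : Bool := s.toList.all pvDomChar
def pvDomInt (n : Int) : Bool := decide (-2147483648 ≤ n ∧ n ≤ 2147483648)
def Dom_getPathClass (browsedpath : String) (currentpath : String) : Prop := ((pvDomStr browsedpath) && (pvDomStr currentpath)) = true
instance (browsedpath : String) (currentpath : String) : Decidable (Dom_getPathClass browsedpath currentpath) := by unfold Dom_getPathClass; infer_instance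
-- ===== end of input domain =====

-- B replaces A's split-into-lists + element-wise prefix loop by a single startswith(currentpath + '/') test (idiomatic; return value proved equal everywhere).

-- ===== PORT A =====
-- A's 'for index, id in enumerate(currentpathList): if id != browsedpathList[index]: isCurrentNode = False; break'
-- (the break only cuts work, not the resulting flag, so the recursion returns at the first mismatch likewise)
def getPathClassLoop (bl : List (List Char)) (i : Nat) : List (List Char) → Bool
  | [] => true
  | id :: rest =>
    match PySem.List.pyGet? bl (i : Int) with
    | none => false   -- unreachable: the loop runs only under len(bl) > len(cl), every index is in range
    | some x => if id ≠ x then false else getPathClassLoop bl (i + 1) rest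

def getPathClass (browsedpath : String) (currentpath : String) : String :=
  if currentpath == browsedpath then " currentitem"
  else
    let browsedpathList := PySem.Chars.splitOn browsedpath.toList ['/']
    let currentpathList := PySem.Chars.splitOn currentpath.toList ['/']
    if browsedpathList.length > currentpathList.length then
      if getPathClassLoop browsedpathList 0 currentpathList then " currentnode" else ""
    else ""

-- ===== PORT B =====
def getPathClass_alt (browsedpath : String) (currentpath : String) : String :=
  if currentpath == browsedpath then " currentitem"
  else if PySem.Str.startswith browsedpath (currentpath ++ "/") then " currentnode"
  else ""

-- ===== PRECONDITION & SPEC =====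
def Spec_getPathClass (browsedpath : String) (currentpath : String) (out : String) : Prop := out = getPathClass_alt browsedpath currentpath
instance (browsedpath : String) (currentpath : String) (out : String) : Decidable (Spec_getPathClass browsedpath currentpath out) := by unfold Spec_getPathClass; infer_instance

-- ===== CLAIM (what is proved, stated in full; the proofs are below) =====
def Claim_equal_getPathClass : Prop := ∀ (browsedpath : String) (currentpath : String), Dom_getPathClass browsedpath currentpath → Spec_getPathClass browsedpath currentpath (getPathClass browsedpath currentpath)

-- ===== LEMMAS AND PROOFS =====

-- a simple structural recursion equal to PySem.Chars.splitOn with the one-char separator '/'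
def consHead (pre : List Char) : List (List Char) → List (List Char)
  | [] => [pre]
  | h :: t => (pre ++ h) :: t

def mySplit : List Char → List (List Char)
  | [] => [[]]
  | c :: rest => if c = '/' then [] :: mySplit rest else consHead [c] (mySplit rest)

def myJoin : List (List Char) → List Char
  | [] => []
  | [x] => x
  | x :: xs => x ++ '/' :: myJoin xs

theorem mySplit_ne_nil (s : List Char) : mySplit s ≠ [] := by
  cases s with
  | nil => simp [mySplit]
  | cons c rest =>
    simp only [mySplit]
    split
    · simp
    · cases h : mySplit rest <;> simp [consHead]

theorem consHead_consHead (a b : List Char) (m : List (List Char)) :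
    consHead a (consHead b m) = consHead (a ++ b) m := by
  cases m <;> simp [consHead]

theorem go_eq (fuel : Nat) (l cur : List Char) (acc : List (List Char))
    (h : l.length < fuel) :
    PySem.Chars.splitOn.go ['/'] fuel l cur acc
      = acc.reverse ++ consHead cur.reverse (mySplit l) := by
  induction fuel generalizing l cur acc with
  | zero => omega
  | succ f ih =>
    cases l with
    | nil => simp [PySem.Chars.splitOn.go, mySplit, consHead]
    | cons c rest =>
      by_cases hc : c = '/'
      · subst hc
        rw [PySem.Chars.splitOn.go]
        rw [if_pos (by simp [List.isPrefixOf])]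
        rw [ih _ _ _ (by simpa using Nat.lt_of_succ_lt_succ h)]
        simp only [mySplit, List.length_singleton, List.drop_one,
          List.tail_cons, List.reverse_cons]
        cases hm : mySplit rest with
        | nil => exact absurd hm (mySplit_ne_nil rest)
        | cons h t => simp [consHead]
      · rw [PySem.Chars.splitOn.go]
        rw [if_neg (by simp [List.isPrefixOf, beq_iff_eq]; exact fun hh => hc hh.symm)]
        rw [ih _ _ _ (by simpa using Nat.lt_of_succ_lt_succ h)]
        simp only [mySplit, if_neg hc, List.reverse_cons]
        rw [← consHead_consHead, consHead_consHead]

theorem splitOn_eq_mySplit (s : List Char) :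
    PySem.Chars.splitOn s ['/'] = mySplit s := by
  have := go_eq (s.length + 1) s [] [] (by omega)
  simpa [PySem.Chars.splitOn, consHead] using
    this.trans (by cases h : mySplit s with
      | nil => exact absurd h (mySplit_ne_nil s)
      | cons a t => simp [consHead])

theorem mySplit_append (u v : List Char) :
    mySplit (u ++ '/' :: v) = mySplit u ++ mySplit v := by
  induction u with
  | nil => simp [mySplit]
  | cons c u' ih =>
    by_cases hc : c = '/'
    · subst hc; simp [mySplit, ih]
    · simp only [List.cons_append, mySplit, if_neg hc, ih]
      cases hm : mySplit u' with
      | nil => exact absurd hm (mySplit_ne_nil u')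
      | cons a t => simp [consHead]

theorem myJoin_mySplit (s : List Char) : myJoin (mySplit s) = s := by
  induction s with
  | nil => simp [mySplit, myJoin]
  | cons c rest ih =>
    by_cases hc : c = '/'
    · subst hc
      simp only [mySplit]
      cases hm : mySplit rest with
      | nil => exact absurd hm (mySplit_ne_nil rest)
      | cons a t =>
        rw [hm] at ih
        simp [myJoin, ih]
    · simp only [mySplit, if_neg hc]
      cases hm : mySplit rest with
      | nil => exact absurd hm (mySplit_ne_nil rest)
      | cons a t =>
        rw [hm] at ih
        cases t with
        | nil => simp_all [consHead, myJoin]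
        | cons b t' => simp_all [consHead, myJoin]

theorem myJoin_cons_cons (a b : List Char) (t : List (List Char)) :
    myJoin (a :: b :: t) = a ++ '/' :: myJoin (b :: t) := rfl

theorem myJoin_append (l1 l2 : List (List Char)) (h1 : l1 ≠ []) (h2 : l2 ≠ []) :
    myJoin (l1 ++ l2) = myJoin l1 ++ '/' :: myJoin l2 := by
  induction l1 with
  | nil => exact absurd rfl h1
  | cons a t ih =>
    cases t with
    | nil =>
      cases l2 with
      | nil => exact absurd rfl h2
      | cons b t2 => simp [myJoin, myJoin_cons_cons]
    | cons b t' =>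
      have h3 : (b :: t') ++ l2 = b :: (t' ++ l2) := rfl
      rw [List.cons_append, h3, myJoin_cons_cons, ← h3, ih (by simp),
        myJoin_cons_cons]
      simp

theorem loop_eq_prefix (bl cl : List (List Char)) (i : Nat)
    (h : i + cl.length ≤ bl.length) :
    getPathClassLoop bl i cl = true ↔ cl <+: bl.drop i := by
  induction cl generalizing i with
  | nil => simp [getPathClassLoop]
  | cons id rest ih =>
    have hi : i < bl.length := by simp at h; omega
    rw [getPathClassLoop]
    rw [show PySem.List.pyGet? bl (i : Int) = bl[i]? from by
      simp [PySem.List.pyGet?_natCast]]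
    rw [List.getElem?_eq_getElem hi]
    have hdrop : bl.drop i = bl[i] :: bl.drop (i + 1) := List.drop_eq_getElem_cons hi
    by_cases hid : id = bl[i]
    · subst hid
      simp only [ne_eq, not_true_eq_false, if_false]
      rw [ih (i + 1) (by simp at h ⊢; omega)]
      constructor
      · intro hp; rw [hdrop]; exact List.cons_prefix_cons.mpr ⟨rfl, hp⟩
      · intro hp; rw [hdrop] at hp; exact (List.cons_prefix_cons.mp hp).2
    · simp only [ne_eq, hid, not_false_eq_true, if_pos]
      constructor
      · intro hf; cases hf
      · intro hp
        rw [hdrop] at hp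
        exact absurd (List.cons_prefix_cons.mp hp).1 hid

theorem core_iff (b c : List Char) :
    ((mySplit b).length > (mySplit c).length ∧ getPathClassLoop (mySplit b) 0 (mySplit c) = true)
      ↔ (c ++ ['/']) <+: b := by
  constructor
  · rintro ⟨hlen, hloop⟩
    have hp : mySplit c <+: mySplit b :=
      (loop_eq_prefix _ _ 0 (by omega)).1 (by simpa using hloop)
    rcases hp with ⟨t, ht⟩
    have htne : t ≠ [] := by
      intro h0; rw [h0, List.append_nil] at ht; rw [ht] at hlen; omega
    have hb : b = c ++ '/' :: myJoin t := by
      conv_lhs => rw [← myJoin_mySplit b]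
      rw [← ht, myJoin_append _ _ (mySplit_ne_nil c) htne, myJoin_mySplit]
    exact ⟨myJoin t, by rw [hb]; simp⟩
  · rintro ⟨r, hr⟩
    have hb : b = c ++ '/' :: r := by rw [← hr]; simp
    subst hb
    rw [mySplit_append]
    have hrne := mySplit_ne_nil r
    constructor
    · simp only [List.length_append, gt_iff_lt]
      have : 0 < (mySplit r).length := List.length_pos_iff.mpr hrne
      omega
    · rw [loop_eq_prefix _ _ 0 (by simp)]
      simp

-- ===== VERDICT (by name: the statement is the Claim_ definition above) =====
theorem getPathClass_spec : Claim_equal_getPathClass := by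
  intro b c _
  unfold Spec_getPathClass getPathClass getPathClass_alt
  by_cases he : c == b
  · simp [he]
  · simp only [he, Bool.false_eq_true, if_false]
    rw [splitOn_eq_mySplit, splitOn_eq_mySplit]
    have hsw : PySem.Str.startswith b (c ++ "/") = true ↔ (c.toList ++ ['/']) <+: b.toList := by
      rw [PySem.Str.startswith_eq]
      rw [show (c ++ "/").toList = c.toList ++ ['/'] by simp]
      exact PySem.Chars.startswith_iff _ _
    by_cases hc : (mySplit b.toList).length > (mySplit c.toList).length ∧
        getPathClassLoop (mySplit b.toList) 0 (mySplit c.toList) = true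
    · have := (core_iff b.toList c.toList).1 hc
      rw [if_pos hc.1, if_pos hc.2, if_pos (hsw.2 this)]
    · have hns : ¬ (c.toList ++ ['/']) <+: b.toList := fun h => hc ((core_iff _ _).2 h)
      rw [if_neg (fun h => hns (hsw.1 h))]
      by_cases h1 : (mySplit b.toList).length > (mySplit c.toList).length
      · rw [if_pos h1, if_neg (by intro h2; exact hc ⟨h1, h2⟩)]
      · rw [if_neg h1]
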